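-- pv_equiv track=rewrite | github.com/GeorgeParaschiv/Advent-Of-Code-2024 | Day 12/day12.py | calculateEdges
-- ===== SOURCE A (Python) =====
-- from collections import defaultdict, deque
--
-- def calculateEdges(region):
--
--     vertices = defaultdict(lambda:0)
--
--     for x,y in region:
--         vertices[(x,y)] += 1
--         vertices[(x+1,y)] += 1
--         vertices[(x,y+1)] += 1
--         vertices[(x+1,y+1)] += 1
--
--     edges = 0
--     for pos, vertex in vertices.items():
--         if vertex % 2 == 1:
--             edges += 1
--         elif vertex == 2 and (((pos[0],pos[1]) in region and (pos[0]-1,pos[1]-1) in region) or ((pos[0],pos[1]-1) in region and (pos[0]-1, pos[1]) in region)):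
--             edges += 2
--
--     return edges
-- ===== SOURCE B (Python) =====
-- def calculateEdges(region):
--     # Corner counting: each cell contributes one side per convex or concave corner.
--     cells = set(region)
--     total = 0
--     for x, y in region:
--         for dx, dy in ((1, 1), (1, -1), (-1, 1), (-1, -1)):
--             side1 = (x + dx, y) in cells
--             side2 = (x, y + dy) in cells
--             if not side1 and not side2:
--                 total += 1
--             elif side1 and side2 and (x + dx, y + dy) not in cells:
--                 total += 1
--     return total
-- ===== Notes on version B (the rewrite author's own statement) =====
-- stated objective: alternative
-- what changed: Replaces A's two-pass vertex-multiplicity counter (defaultdict of vertex counts, then a parity/diagonal classification of each vertex) by a direct one-pass corner count: for each cell and each of its four corners, count a convex corner when both orthogonal neighbours are absent and a concave corner when both are present but the diagonal is absent.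
import Mathlib
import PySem

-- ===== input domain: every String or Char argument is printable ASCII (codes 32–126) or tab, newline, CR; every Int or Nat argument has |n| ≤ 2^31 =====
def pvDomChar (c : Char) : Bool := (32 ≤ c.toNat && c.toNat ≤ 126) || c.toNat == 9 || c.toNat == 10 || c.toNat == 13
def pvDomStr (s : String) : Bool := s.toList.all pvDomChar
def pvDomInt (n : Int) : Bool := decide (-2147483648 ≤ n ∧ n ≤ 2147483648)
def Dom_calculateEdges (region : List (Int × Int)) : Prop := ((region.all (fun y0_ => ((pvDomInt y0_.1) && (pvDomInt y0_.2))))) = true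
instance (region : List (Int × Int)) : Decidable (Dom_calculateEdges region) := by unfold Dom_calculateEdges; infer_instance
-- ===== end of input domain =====

-- B replaces A's vertex-multiplicity classification by direct convex/concave corner counting (alternative algorithm).

-- ===== PORT A =====
def calculateEdges (region : List (Int × Int)) : Int :=
  let vertices : PySem.Dict (Int × Int) Int :=
    region.foldl (fun d c =>
      ((((d.modify (c.1, c.2) 0 (· + 1)).modify (c.1 + 1, c.2) 0 (· + 1)).modify
          (c.1, c.2 + 1) 0 (· + 1)).modify (c.1 + 1, c.2 + 1) 0 (· + 1)))
      PySem.Dict.empty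
  vertices.items.foldl (fun edges pv =>
    if PySem.Int.mod pv.2 2 = 1 then edges + 1
    else if pv.2 = 2 ∧ (((pv.1.1, pv.1.2) ∈ region ∧ (pv.1.1 - 1, pv.1.2 - 1) ∈ region) ∨
          ((pv.1.1, pv.1.2 - 1) ∈ region ∧ (pv.1.1 - 1, pv.1.2) ∈ region)) then edges + 2
    else edges) 0

-- ===== PORT B =====
def calculateEdges_alt (region : List (Int × Int)) : Int :=
  let cells : PySem.Set (Int × Int) := PySem.Set.ofList region
  region.foldl (fun total c =>
    [((1 : Int), (1 : Int)), (1, -1), (-1, 1), (-1, -1)].foldl (fun t d =>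
      if (c.1 + d.1, c.2) ∉ cells ∧ (c.1, c.2 + d.2) ∉ cells then t + 1
      else if (c.1 + d.1, c.2) ∈ cells ∧ (c.1, c.2 + d.2) ∈ cells ∧
             (c.1 + d.1, c.2 + d.2) ∉ cells then t + 1
      else t) total) 0

-- ===== PRECONDITION & SPEC =====
-- region is a Python set (type convention: a List of DISTINCT elements); Pre_ states exactly that
-- set invariant (Nodup) and excludes no input of A's domain.
def Pre_calculateEdges (region : List (Int × Int)) : Prop := region.Nodup
instance (region : List (Int × Int)) : Decidable (Pre_calculateEdges region) := by unfold Pre_calculateEdges; infer_instance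
def pvWitness_calculateEdges : (List (Int × Int)) := [(0, 0), (1, 1)]
def Spec_calculateEdges (region : List (Int × Int)) (out : Int) : Prop := out = calculateEdges_alt region
instance (region : List (Int × Int)) (out : Int) : Decidable (Spec_calculateEdges region out) := by unfold Spec_calculateEdges; infer_instance

-- ===== CLAIM (what is proved, stated in full; the proofs are below) =====
def Claim_equal_calculateEdges : Prop := ∀ (region : List (Int × Int)), Dom_calculateEdges region → Pre_calculateEdges region → Spec_calculateEdges region (calculateEdges region)

-- ===== LEMMAS AND PROOFS =====

-- stamps c: the four vertices touched by cell c, in A's update order.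
def pvStamps (c : Int × Int) : List (Int × Int) :=
  [(c.1, c.2), (c.1 + 1, c.2), (c.1, c.2 + 1), (c.1 + 1, c.2 + 1)]

-- Nv v: the four cells having v as a corner.
def pvNv (v : Int × Int) : List (Int × Int) :=
  [(v.1 - 1, v.2 - 1), (v.1, v.2 - 1), (v.1 - 1, v.2), (v.1, v.2)]

-- per-item contribution of A's second loop
def pvFA (region : List (Int × Int)) (pv : (Int × Int) × Int) : Int :=
  if PySem.Int.mod pv.2 2 = 1 then 1
  else if pv.2 = 2 ∧ (((pv.1.1, pv.1.2) ∈ region ∧ (pv.1.1 - 1, pv.1.2 - 1) ∈ region) ∨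
        ((pv.1.1, pv.1.2 - 1) ∈ region ∧ (pv.1.1 - 1, pv.1.2) ∈ region)) then 2
  else 0

-- contribution of cell c at its corner v (for c ∈ Nv v), in B's corner test
def pvG (region : List (Int × Int)) (v c : Int × Int) : Int :=
  if (2 * v.1 - 1 - c.1, c.2) ∉ region ∧ (c.1, 2 * v.2 - 1 - c.2) ∉ region then 1
  else if (2 * v.1 - 1 - c.1, c.2) ∈ region ∧ (c.1, 2 * v.2 - 1 - c.2) ∈ region ∧
         (2 * v.1 - 1 - c.1, 2 * v.2 - 1 - c.2) ∉ region then 1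
  else 0


-- contribution of cell c at its corner in direction d, B's corner test over the region list
def pvCorner (region : List (Int × Int)) (c d : Int × Int) : Int :=
  if (c.1 + d.1, c.2) ∉ region ∧ (c.1, c.2 + d.2) ∉ region then 1
  else if (c.1 + d.1, c.2) ∈ region ∧ (c.1, c.2 + d.2) ∈ region ∧
         (c.1 + d.1, c.2 + d.2) ∉ region then 1
  else 0

-- per-cell total corner contribution
def pvGB (region : List (Int × Int)) (c : Int × Int) : Int :=
  ([((1 : Int), (1 : Int)), (1, -1), (-1, 1), (-1, -1)].map (pvCorner region c)).sum

lemma pvStamps_nodup (c : Int × Int) : (pvStamps c).Nodup := by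
  simp [pvStamps, Prod.ext_iff]

lemma pvNv_nodup (v : Int × Int) : (pvNv v).Nodup := by
  simp [pvNv, Prod.ext_iff]

lemma mem_stamps_iff (v c : Int × Int) : v ∈ pvStamps c ↔ c ∈ pvNv v := by
  simp [pvStamps, pvNv, Prod.ext_iff]; omega

-- A's first loop builds Counter(flatMap stamps)
lemma A_counter (R : List (Int × Int)) :
    R.foldl (fun d c =>
      ((((d.modify (c.1, c.2) 0 (· + 1)).modify (c.1 + 1, c.2) 0 (· + 1)).modify
          (c.1, c.2 + 1) 0 (· + 1)).modify (c.1 + 1, c.2 + 1) 0 (· + 1)))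
      PySem.Dict.empty = PySem.Dict.counter (R.flatMap pvStamps) := by
  rw [PySem.Dict.counter_eq_foldl]
  induction R using List.reverseRecOn with
  | nil => rfl
  | append_singleton xs x ih =>
      rw [List.foldl_append, List.flatMap_append, List.foldl_append, ih]
      rfl

-- A's result as a sum over the distinct vertices
lemma A_sum (R : List (Int × Int)) :
    calculateEdges R =
      ((PySem.Set.ofList (R.flatMap pvStamps)).map
        (fun v => pvFA R (v, ((R.flatMap pvStamps).count v : Int)))).sum := by
  show (R.foldl _ PySem.Dict.empty).items.foldl _ 0 = _
  rw [A_counter, PySem.Dict.items_counter]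
  have hb : (fun (edges : Int) (pv : (Int × Int) × Int) =>
      if PySem.Int.mod pv.2 2 = 1 then edges + 1
      else if pv.2 = 2 ∧ (((pv.1.1, pv.1.2) ∈ R ∧ (pv.1.1 - 1, pv.1.2 - 1) ∈ R) ∨
            ((pv.1.1, pv.1.2 - 1) ∈ R ∧ (pv.1.1 - 1, pv.1.2) ∈ R)) then edges + 2
      else edges) = fun edges pv => edges + pvFA R pv := by
    funext e pv
    simp only [pvFA]
    split_ifs <;> ring
  rw [hb, PySem.List.foldl_add, List.map_map, zero_add]
  rfl

-- symmetric counting: for duplicate-free lists, counting members of l₂ in l₁ = counting members of l₁ in l₂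
lemma countP_mem_comm {α : Type} [DecidableEq α] (l₁ l₂ : List α)
    (h₁ : l₁.Nodup) (h₂ : l₂.Nodup) :
    l₁.countP (fun c => decide (c ∈ l₂)) = l₂.countP (fun c => decide (c ∈ l₁)) := by
  have key : ∀ (a b : List α), a.Nodup →
      (a.filter (fun c => decide (c ∈ b))).toFinset = a.toFinset ∩ b.toFinset := by
    intro a b _
    apply Finset.ext; intro x
    simp
  rw [List.countP_eq_length_filter, List.countP_eq_length_filter,
      ← List.toFinset_card_of_nodup (h₁.filter _),
      ← List.toFinset_card_of_nodup (h₂.filter _),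
      key l₁ l₂ h₁, key l₂ l₁ h₂, Finset.inter_comm]

lemma sum_map_ite_one {α : Type} (R : List α) (p : α → Prop) [DecidablePred p] :
    (R.map (fun c => if p c then 1 else 0)).sum = R.countP (fun c => decide (p c)) := by
  induction R with
  | nil => simp
  | cons x xs ih =>
      by_cases h : p x
      · simp [ih, h, Nat.add_comm]
      · simp [ih, h]

-- the multiplicity of vertex v is the number of region cells having v as a corner
lemma count_L (R : List (Int × Int)) (hnd : R.Nodup) (v : Int × Int) :
    (R.flatMap pvStamps).count v = (pvNv v).countP (fun u => decide (u ∈ R)) := by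
  rw [List.count_flatMap]
  have h1 : (R.map (List.count v ∘ pvStamps)) = R.map (fun c => if c ∈ pvNv v then 1 else 0) := by
    refine List.map_congr_left (fun c _ => ?_)
    by_cases h : c ∈ pvNv v
    · simp [List.count_eq_one_of_mem (pvStamps_nodup c) ((mem_stamps_iff v c).mpr h), h]
    · simp [List.count_eq_zero_of_not_mem (fun hm => h ((mem_stamps_iff v c).mp hm)), h]
  rw [h1, sum_map_ite_one]
  have hc := countP_mem_comm R (pvNv v) hnd (pvNv_nodup v)
  convert hc using 2 <;>
    exact funext fun c => decide_eq_decide.mpr Iff.rfl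

-- B's result as a sum over cells
lemma B_sum (R : List (Int × Int)) :
    calculateEdges_alt R = (R.map (pvGB R)).sum := by
  show R.foldl _ 0 = _
  have hb : (fun (total : Int) (c : Int × Int) =>
      [((1 : Int), (1 : Int)), (1, -1), (-1, 1), (-1, -1)].foldl (fun t d =>
        if (c.1 + d.1, c.2) ∉ PySem.Set.ofList R ∧ (c.1, c.2 + d.2) ∉ PySem.Set.ofList R then t + 1
        else if (c.1 + d.1, c.2) ∈ PySem.Set.ofList R ∧ (c.1, c.2 + d.2) ∈ PySem.Set.ofList R ∧
               (c.1 + d.1, c.2 + d.2) ∉ PySem.Set.ofList R then t + 1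
        else t) total) = fun total c => total + pvGB R c := by
    funext t c
    have hc : (fun (t : Int) (d : Int × Int) =>
        if (c.1 + d.1, c.2) ∉ PySem.Set.ofList R ∧ (c.1, c.2 + d.2) ∉ PySem.Set.ofList R then t + 1
        else if (c.1 + d.1, c.2) ∈ PySem.Set.ofList R ∧ (c.1, c.2 + d.2) ∈ PySem.Set.ofList R ∧
               (c.1 + d.1, c.2 + d.2) ∉ PySem.Set.ofList R then t + 1
        else t) = fun t d => t + pvCorner R c d := by
      funext t d
      simp only [pvCorner, PySem.Set.mem_ofList]
      split_ifs <;> ring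
    rw [hc, PySem.List.foldl_add]
    rfl
  rw [hb, PySem.List.foldl_add, zero_add]

-- per-cell corner sum regrouped by the four corner vertices
lemma GB_eq (R : List (Int × Int)) (c : Int × Int) :
    pvGB R c = ∑ v ∈ (pvStamps c).toFinset, pvG R v c := by
  rw [List.sum_toFinset _ (pvStamps_nodup c)]
  simp only [pvGB, pvStamps, List.map_cons, List.map_nil, List.sum_cons, List.sum_nil,
    pvCorner, pvG]
  ring_nf

-- per-vertex: corner contributions at v sum to A's classification of v
lemma vertex_eq (R : List (Int × Int)) (v : Int × Int) :
    (∑ c ∈ R.toFinset, if c ∈ pvNv v then pvG R v c else 0) =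
      pvFA R (v, ((pvNv v).countP (fun u => decide (u ∈ R)) : Int)) := by
  have h1 : (∑ c ∈ R.toFinset, if c ∈ pvNv v then pvG R v c else 0)
      = ∑ c ∈ (pvNv v).toFinset, if c ∈ R then pvG R v c else 0 := by
    have e1 : (∑ c ∈ R.toFinset, if c ∈ pvNv v then pvG R v c else 0)
        = ∑ c ∈ R.toFinset, if c ∈ (pvNv v).toFinset then pvG R v c else 0 :=
      Finset.sum_congr rfl (fun c _ => by simp only [List.mem_toFinset])
    have e2 : (∑ c ∈ (pvNv v).toFinset, if c ∈ R then pvG R v c else 0)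
        = ∑ c ∈ (pvNv v).toFinset, if c ∈ R.toFinset then pvG R v c else 0 :=
      Finset.sum_congr rfl (fun c _ => by simp only [List.mem_toFinset])
    rw [e1, e2, Finset.sum_ite_mem, Finset.sum_ite_mem, Finset.inter_comm]
  rw [h1, List.sum_toFinset _ (pvNv_nodup v)]
  by_cases p1 : (v.1 - 1, v.2 - 1) ∈ R <;> by_cases p2 : (v.1, v.2 - 1) ∈ R <;>
    by_cases p3 : (v.1 - 1, v.2) ∈ R <;> by_cases p4 : (v.1, v.2) ∈ R <;>
    · simp only [pvNv, pvFA, pvG, List.map_cons, List.map_nil, List.sum_cons, List.sum_nil,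
        List.countP_cons, List.countP_nil, p1, p2, p3, p4, if_true, if_false,
        decide_true, decide_false]
      ring_nf
      try ring_nf at p1
      try ring_nf at p2
      try ring_nf at p3
      try ring_nf at p4
      simp [p1, p2, p3, p4, PySem.Int.mod]

theorem calculateEdges_spec : Claim_equal_calculateEdges := by
  intro R _ hnd
  show calculateEdges R = calculateEdges_alt R
  rw [A_sum, B_sum]
  have hofl : (PySem.Set.ofList (R.flatMap pvStamps)).toFinset = (R.flatMap pvStamps).toFinset := by
    apply Finset.ext; intro v
    simp [PySem.Set.mem_ofList]
  rw [← List.sum_toFinset _ (PySem.Set.nodup_ofList _), hofl,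
      ← List.sum_toFinset _ hnd]
  -- rewrite the A-side summand using count_L
  rw [Finset.sum_congr rfl (fun v _ => by rw [count_L R hnd v])]
  symm
  -- B side: regroup per cell into corner-vertex sums, then swap
  have hsub : ∀ c ∈ R.toFinset, (pvStamps c).toFinset ⊆ (R.flatMap pvStamps).toFinset := by
    intro c hc v hv
    simp only [List.mem_toFinset] at *
    exact List.mem_flatMap.mpr ⟨c, hc, hv⟩
  calc (∑ c ∈ R.toFinset, pvGB R c)
      = ∑ c ∈ R.toFinset, ∑ v ∈ (pvStamps c).toFinset, pvG R v c :=
        Finset.sum_congr rfl (fun c _ => GB_eq R c)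
    _ = ∑ c ∈ R.toFinset, ∑ v ∈ (R.flatMap pvStamps).toFinset,
          (if c ∈ pvNv v then pvG R v c else 0) := by
        refine Finset.sum_congr rfl (fun c hc => ?_)
        have h1 : (∑ v ∈ (R.flatMap pvStamps).toFinset, if c ∈ pvNv v then pvG R v c else 0)
            = ∑ v ∈ (R.flatMap pvStamps).toFinset,
                if v ∈ (pvStamps c).toFinset then pvG R v c else 0 := by
          refine Finset.sum_congr rfl (fun v _ => ?_)
          simp only [List.mem_toFinset, mem_stamps_iff]
        rw [h1, Finset.sum_ite_mem, Finset.inter_eq_right.mpr (hsub c hc)]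
    _ = ∑ v ∈ (R.flatMap pvStamps).toFinset, ∑ c ∈ R.toFinset,
          (if c ∈ pvNv v then pvG R v c else 0) := Finset.sum_comm
    _ = ∑ v ∈ (R.flatMap pvStamps).toFinset,
          pvFA R (v, ((pvNv v).countP (fun u => decide (u ∈ R)) : Int)) :=
        Finset.sum_congr rfl (fun v _ => vertex_eq R v)
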